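-- pv_equiv track=rewrite | github.com/cfarm6/jfchemistry | jfchemistry/polymers/extract_units.py | _exact_cover_monomers
-- ===== SOURCE A (Python) =====
-- from collections import defaultdict, deque
--
-- def _exact_cover_monomers(
--     remaining_atoms: frozenset[int],
--     monomer_candidates: list[frozenset[int]],
-- ) -> list[frozenset[int]] | None:
--     """Choose non-overlapping monomer matches that exactly cover remaining heavy atoms."""
--     by_atom: dict[int, list[frozenset[int]]] = defaultdict(list)
--     for cand in monomer_candidates:
--         if cand <= remaining_atoms:
--             for atom in cand:
--                 by_atom[atom].append(cand)
--
--     for _atom, candidates in by_atom.items():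
--         candidates.sort(key=lambda s: tuple(sorted(s)))
--
--     def _search(
--         uncovered: frozenset[int],
--         chosen: list[frozenset[int]],
--     ) -> list[frozenset[int]] | None:
--         if not uncovered:
--             return chosen
--         pivot = min(uncovered)
--         for cand in by_atom.get(pivot, []):
--             if cand <= uncovered:
--                 result = _search(frozenset(uncovered - cand), [*chosen, cand])
--                 if result is not None:
--                     return result
--         return None
--
--     return _search(remaining_atoms, [])
-- ===== SOURCE B (Python) =====
-- def _exact_cover_monomers(
--     remaining_atoms,
--     monomer_candidates,
-- ):
--     """Choose non-overlapping monomer matches that exactly cover remaining heavy atoms.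
--
--     Dict-free re-implementation: keep one flat list of usable candidates, sort the
--     pivot's candidates on demand, and build the chosen list on the way back up.
--     """
--     valid = [cand for cand in monomer_candidates if cand <= remaining_atoms]
--
--     def _go(uncovered):
--         if not uncovered:
--             return []
--         pivot = min(uncovered)
--         for cand in sorted(
--             (c for c in valid if pivot in c), key=lambda s: tuple(sorted(s))
--         ):
--             if cand <= uncovered:
--                 rest = _go(uncovered - cand)
--                 if rest is not None:
--                     return [cand, *rest]
--         return None
--
--     return _go(remaining_atoms)
-- ===== Notes on version B (the rewrite author's own statement) =====
-- stated objective: simpler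
-- what changed: B drops A's per-atom defaultdict precompute and per-entry sorting: it keeps one flat list of usable candidates, sorts the pivot's candidates on demand at each search node, and builds the chosen list on the way back up instead of threading an accumulator through the recursion.
import Mathlib
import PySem

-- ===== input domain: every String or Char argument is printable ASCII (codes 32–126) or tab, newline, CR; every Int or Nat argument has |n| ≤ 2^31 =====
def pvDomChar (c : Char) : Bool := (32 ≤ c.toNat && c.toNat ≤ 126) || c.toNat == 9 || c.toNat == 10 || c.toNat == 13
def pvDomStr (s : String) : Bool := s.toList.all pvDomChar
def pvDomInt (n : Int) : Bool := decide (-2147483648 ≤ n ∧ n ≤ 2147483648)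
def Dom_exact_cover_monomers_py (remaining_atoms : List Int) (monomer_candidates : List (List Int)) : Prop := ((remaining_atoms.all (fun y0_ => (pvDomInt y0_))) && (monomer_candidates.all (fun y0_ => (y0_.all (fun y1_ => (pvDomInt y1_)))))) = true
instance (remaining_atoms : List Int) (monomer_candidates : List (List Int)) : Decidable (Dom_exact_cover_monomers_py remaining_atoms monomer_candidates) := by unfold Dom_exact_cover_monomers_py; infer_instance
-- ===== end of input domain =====

-- B replaces A's per-atom defaultdict precompute by one flat candidate list (pivot's candidates
-- sorted on demand) and builds the result on return instead of threading an accumulator: simpler.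
-- Fuel (= |remaining|+1, more than the maximal recursion depth) only makes the recursions total.

-- ===== PORT A =====
-- inner 'for cand in by_atom.get(pivot, []):' loop of A's _search (search = the recursive call at the next depth)
def pvLoopA (search : List Int → List (List Int) → Option (List (List Int))) :
    List Int → List (List Int) → List (List Int) → Option (List (List Int))
  | _, _, [] => none
  | unc, chosen, c :: rest =>
    if PySem.Set.issubset c unc then
      match search (PySem.Set.diff unc c) (chosen ++ [c]) with
      | some r => some r
      | none => pvLoopA search unc chosen rest
    else pvLoopA search unc chosen rest

-- A's recursive _search(uncovered, chosen)
def pvSearchA (byAtom : PySem.Dict Int (List (List Int))) :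
    Nat → List Int → List (List Int) → Option (List (List Int))
  | 0, _, _ => none
  | f + 1, unc, chosen =>
    if unc = [] then some chosen
    else
      match PySem.List.min? unc (fun x => x) with
      | none => none
      | some pivot => pvLoopA (pvSearchA byAtom f) unc chosen (byAtom.getD pivot [])

def exact_cover_monomers_py (remaining_atoms : List Int) (monomer_candidates : List (List Int)) : Option (List (List Int)) :=
  let R : PySem.Set Int := PySem.Set.ofList remaining_atoms
  -- by_atom: defaultdict(list); for cand: if cand <= remaining_atoms: for atom in cand: by_atom[atom].append(cand)
  let byAtomRaw : PySem.Dict Int (List (List Int)) :=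
    monomer_candidates.foldl (fun d cand =>
      let cs : PySem.Set Int := PySem.Set.ofList cand
      if PySem.Set.issubset cs R then
        cs.foldl (fun d atom => d.modify atom [] (fun l => l ++ [cs])) d
      else d) PySem.Dict.empty
  -- for _atom, candidates in by_atom.items(): candidates.sort(key=lambda s: tuple(sorted(s)))
  let byAtom : PySem.Dict Int (List (List Int)) :=
    PySem.Dict.mk (byAtomRaw.items.map (fun kv =>
      (kv.1, PySem.List.sorted kv.2 (fun s => PySem.List.sorted s (fun x => x) false) false)))
  pvSearchA byAtom (R.length + 1) R []

-- ===== PORT B =====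
-- inner 'for cand in sorted(...):' loop of B's _go (go = the recursive call at the next depth)
def pvScanB (go : List Int → Option (List (List Int))) :
    List Int → List (List Int) → Option (List (List Int))
  | _, [] => none
  | unc, c :: rest =>
    if PySem.Set.issubset c unc then
      match go (PySem.Set.diff unc c) with
      | some r => some (c :: r)
      | none => pvScanB go unc rest
    else pvScanB go unc rest

-- B's recursive _go(uncovered), building the chosen list on return
def pvGoB (valid : List (List Int)) : Nat → List Int → Option (List (List Int))
  | 0, _ => none
  | f + 1, unc =>
    if unc = [] then some []
    else
      match PySem.List.min? unc (fun x => x) with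
      | none => none
      | some pivot =>
        pvScanB (pvGoB valid f) unc
          (PySem.List.sorted (valid.filter (fun c => PySem.Set.contains c pivot))
            (fun s => PySem.List.sorted s (fun x => x) false) false)

def exact_cover_monomers_py_alt (remaining_atoms : List Int) (monomer_candidates : List (List Int)) : Option (List (List Int)) :=
  let R : PySem.Set Int := PySem.Set.ofList remaining_atoms
  let valid : List (List Int) :=
    (monomer_candidates.map PySem.Set.ofList).filter (fun c => PySem.Set.issubset c R)
  pvGoB valid (R.length + 1) R

-- ===== PRECONDITION & SPEC =====
def Spec_exact_cover_monomers_py (remaining_atoms : List Int) (monomer_candidates : List (List Int)) (out : Option (List (List Int))) : Prop := out = exact_cover_monomers_py_alt remaining_atoms monomer_candidates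
instance (remaining_atoms : List Int) (monomer_candidates : List (List Int)) (out : Option (List (List Int))) : Decidable (Spec_exact_cover_monomers_py remaining_atoms monomer_candidates out) := by unfold Spec_exact_cover_monomers_py; infer_instance

-- ===== CLAIM (what is proved, stated in full; the proofs are below) =====
def Claim_equal_exact_cover_monomers_py : Prop := ∀ (remaining_atoms : List Int) (monomer_candidates : List (List Int)), Dom_exact_cover_monomers_py remaining_atoms monomer_candidates → Spec_exact_cover_monomers_py remaining_atoms monomer_candidates (exact_cover_monomers_py remaining_atoms monomer_candidates)

-- ===== LEMMAS AND PROOFS =====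

-- the inner 'for atom in cand: by_atom[atom].append(cand)' loop appends v to entry a exactly when a ∈ cand
lemma pv_getD_inner (v : List (List Int) → List (List Int)) (a : Int) :
    ∀ (cs : List Int) (d : PySem.Dict Int (List (List Int))), cs.Nodup →
      (cs.foldl (fun d atom => d.modify atom [] v) d).getD a []
        = if a ∈ cs then v (d.getD a []) else d.getD a [] := by
  intro cs
  induction cs with
  | nil => intro d _; simp
  | cons x cs ih =>
    intro d hnd
    simp only [List.foldl_cons]
    rw [ih _ (List.Nodup.of_cons hnd)]
    rw [PySem.Dict.getD_modify]
    by_cases hax : a = x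
    · subst hax
      have : a ∉ cs := (List.nodup_cons.mp hnd).1
      simp [this]
    · simp [hax]

-- characterisation of by_atom before the per-atom sort: entry a = the valid candidates containing a
lemma pv_getD_raw (R : List Int) (a : Int) :
    ∀ (mc : List (List Int)) (d : PySem.Dict Int (List (List Int))),
      (mc.foldl (fun d cand =>
          if PySem.Set.issubset (PySem.Set.ofList cand) R then
            (PySem.Set.ofList cand).foldl
              (fun d atom => d.modify atom [] (fun l => l ++ [PySem.Set.ofList cand])) d
          else d) d).getD a []
        = d.getD a []
          ++ ((mc.map PySem.Set.ofList).filter (fun c => PySem.Set.issubset c R)).filter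
               (fun c => PySem.Set.contains c a) := by
  intro mc
  induction mc with
  | nil => intro d; simp
  | cons cand mc ih =>
    intro d
    simp only [List.foldl_cons, List.map_cons, List.filter_cons]
    rw [ih]
    cases hsub : PySem.Set.issubset (PySem.Set.ofList cand) R with
    | false =>
      simp only [Bool.false_eq_true, if_false]
    | true =>
      simp only [if_true]
      rw [pv_getD_inner _ _ _ _ (PySem.Set.nodup_ofList cand)]
      cases hc : PySem.Set.contains (PySem.Set.ofList cand) a with
      | true =>
        have hmem : a ∈ PySem.Set.ofList cand := by
          have := hc; simpa [pysem] using this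
        simp only [hc, hmem, if_pos, List.filter_cons, List.append_assoc]
        simp
      | false =>
        have hmem : a ∉ PySem.Set.ofList cand := by
          intro hm; have : PySem.Set.contains (PySem.Set.ofList cand) a = true := by simp [pysem, hm]
          rw [this] at hc; exact Bool.noConfusion hc
        simp only [hmem, if_false]
        have h2 : a ∉ cand := by simpa [pysem] using hmem
        rw [List.filter_cons_of_neg (by simp [pysem, h2])]

-- mapping a function over a dict's stored values maps it over every lookup
lemma pv_get?_mk_map (f : List (List Int) → List (List Int)) :
    ∀ (l : List (Int × List (List Int))) (a : Int),
      (PySem.Dict.mk (l.map (fun kv => (kv.1, f kv.2)))).get? a = ((PySem.Dict.mk l).get? a).map f := by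
  intro l
  induction l with
  | nil => intro a; simp [PySem.Dict.get?]
  | cons kv l ih =>
    intro a
    simp only [List.map_cons]
    rw [PySem.Dict.get?_mk_cons, PySem.Dict.get?_mk_cons]
    by_cases h : kv.1 == a
    · simp [h]
    · simp only [h]; simp at h; simp [ih]

-- main invariant: A's accumulator-passing search is B's build-on-return search with 'chosen' prepended
lemma pv_search_eq (byAtom : PySem.Dict Int (List (List Int))) (valid : List (List Int))
    (h : ∀ p : Int, byAtom.getD p []
        = PySem.List.sorted (valid.filter (fun c => PySem.Set.contains c p))
            (fun s => PySem.List.sorted s (fun x => x) false) false) :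
    ∀ (f : Nat) (unc : List Int) (chosen : List (List Int)),
      pvSearchA byAtom f unc chosen = (pvGoB valid f unc).map (fun r => chosen ++ r) := by
  intro f
  induction f with
  | zero => intro unc chosen; simp [pvSearchA, pvGoB]
  | succ f ih =>
    have hloop : ∀ (L : List (List Int)) (unc : List Int) (chosen : List (List Int)),
        pvLoopA (pvSearchA byAtom f) unc chosen L
          = (pvScanB (pvGoB valid f) unc L).map (fun r => chosen ++ r) := by
      intro L
      induction L with
      | nil => intro unc chosen; simp [pvLoopA, pvScanB]
      | cons c rest ihL =>
        intro unc chosen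
        simp only [pvLoopA, pvScanB]
        cases hc : PySem.Set.issubset c unc with
        | false => simp only [Bool.false_eq_true, if_false]; exact ihL unc chosen
        | true =>
          simp only [if_true]
          rw [ih]
          cases hgo : pvGoB valid f (PySem.Set.diff unc c) with
          | none => simp only [Option.map_none]; exact ihL unc chosen
          | some r => simp
    intro unc chosen
    simp only [pvSearchA, pvGoB]
    by_cases hu : unc = []
    · simp [hu]
    · simp only [hu, if_false]
      cases hm : PySem.List.min? unc (fun x => x) with
      | none => simp
      | some pivot =>
        simp only [h pivot, hloop]

-- ===== VERDICT (by name: the statement is the Claim_ definition above) =====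
theorem exact_cover_monomers_py_spec : Claim_equal_exact_cover_monomers_py := by
  intro ra mc _
  unfold Spec_exact_cover_monomers_py
  simp only [exact_cover_monomers_py, exact_cover_monomers_py_alt]
  rw [pv_search_eq]
  · cases pvGoB ((mc.map PySem.Set.ofList).filter
        (fun c => PySem.Set.issubset c (PySem.Set.ofList ra)))
        ((PySem.Set.ofList ra).length + 1) (PySem.Set.ofList ra) <;> simp
  · intro p
    have hmk : ∀ (d : PySem.Dict Int (List (List Int))), PySem.Dict.mk d.items = d := fun d => rfl
    rw [PySem.Dict.getD_eq_get?_getD, pv_get?_mk_map (fun v => PySem.List.sorted v (fun s => PySem.List.sorted s (fun x => x) false) false), hmk]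
    have hraw := pv_getD_raw (PySem.Set.ofList ra) p mc PySem.Dict.empty
    rw [PySem.Dict.getD_eq_get?_getD] at hraw
    simp only [PySem.Dict.getD_empty, List.nil_append] at hraw
    cases hq : (mc.foldl (fun d cand =>
        if PySem.Set.issubset (PySem.Set.ofList cand) (PySem.Set.ofList ra) then
          (PySem.Set.ofList cand).foldl
            (fun d atom => d.modify atom [] (fun l => l ++ [PySem.Set.ofList cand])) d
        else d) PySem.Dict.empty).get? p with
    | none =>
      rw [hq] at hraw
      simp only [Option.getD_none] at hraw
      rw [← hraw]
      simp [pysem]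
    | some v =>
      rw [hq] at hraw
      simp only [Option.getD_some] at hraw
      simp only [Option.map_some, Option.getD_some, hraw]
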